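-- pv_equiv track=rewrite | github.com/drakovych/Python3 | HomeWork_Task_4.py | sum_cards
-- ===== SOURCE A (Python) =====
-- def sum_cards(sum):
--     x = 0
--     for i in sum:
--         if (i == '2C' or i == '2D' or i == '2H' or i == '2S' or i == 'JC' or i == 'JD' or i == 'JH' or i == 'JS'):
--             x += 2
--         if (i == '3C' or i == '3D' or i == '3H' or i == '3S' or i == 'QC' or i == 'QD' or i == 'QH' or i == 'QS'):
--             x += 3
--         if (i == '4C' or i == '4D' or i == '4H' or i == '4S' or i == 'KC' or i == 'KD' or i == 'KH' or i == 'KS'):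
--             x += 4
--         if (i == '5C' or i == '5D' or i == '5H' or i == '5S'):
--             x += 5
--         if (i == '6C' or i == '6D' or i == '6H' or i == '6S'):
--             x += 6
--         if (i == '7C' or i == '7D' or i == '7H' or i == '7S'):
--             x += 7
--         if (i == '8C' or i == '8D' or i == '8H' or i == '8S'):
--             x += 8
--         if (i == '9C' or i == '9D' or i == '9H' or i == '9S'):
--             x += 9
--         if (i == '10C' or i == '10D' or i == '10H' or i == '10S'):
--             x += 10
--         if (i == 'AC' or i == 'AD' or i == 'AH' or i == 'AS'):
--             x += 11
--     return x
-- ===== SOURCE B (Python) =====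
-- _TABLE = (
--     ('2', 2), ('3', 3), ('4', 4), ('5', 5), ('6', 6), ('7', 7), ('8', 8),
--     ('9', 9), ('10', 10), ('J', 2), ('Q', 3), ('K', 4), ('A', 11),
-- )
--
--
-- def sum_cards(sum):
--     total = 0
--     for rank, value in _TABLE:
--         for suit in 'CDHS':
--             total += value * sum.count(rank + suit)
--     return total
-- ===== Notes on version B (the rewrite author's own statement) =====
-- stated objective: alternative
-- what changed: Instead of one pass over the hand testing each card against 40 string equalities, B never iterates over the hand's elements itself: it loops over a 13-entry rank/value table crossed with the four suits and accumulates value * hand.count(card) for each of the 52 cards.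
import Mathlib
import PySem

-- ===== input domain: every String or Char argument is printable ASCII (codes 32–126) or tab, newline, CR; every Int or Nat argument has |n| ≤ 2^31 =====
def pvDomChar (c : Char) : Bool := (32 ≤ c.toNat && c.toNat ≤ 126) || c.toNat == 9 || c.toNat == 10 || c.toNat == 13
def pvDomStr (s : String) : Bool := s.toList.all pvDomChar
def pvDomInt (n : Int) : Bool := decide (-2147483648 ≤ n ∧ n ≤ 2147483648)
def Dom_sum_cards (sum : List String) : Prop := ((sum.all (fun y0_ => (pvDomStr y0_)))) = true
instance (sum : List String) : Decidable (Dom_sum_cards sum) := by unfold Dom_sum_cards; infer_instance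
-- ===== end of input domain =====

-- B inverts the traversal: instead of one pass over the hand testing each element against 40 string equalities,
-- it loops over a 13-entry rank/value table crossed with the four suits and accumulates value * hand.count(card);
-- an alternative decomposition of the same cost, not claimed faster.

-- ===== PORT A =====
-- A's loop body: ten independent `if` blocks, each adding its group's value (transliterated step for step).
def pvStepA (x : Int) (i : String) : Int :=
  let x := if i == "2C" || i == "2D" || i == "2H" || i == "2S" || i == "JC" || i == "JD" || i == "JH" || i == "JS" then x + 2 else x
  let x := if i == "3C" || i == "3D" || i == "3H" || i == "3S" || i == "QC" || i == "QD" || i == "QH" || i == "QS" then x + 3 else x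
  let x := if i == "4C" || i == "4D" || i == "4H" || i == "4S" || i == "KC" || i == "KD" || i == "KH" || i == "KS" then x + 4 else x
  let x := if i == "5C" || i == "5D" || i == "5H" || i == "5S" then x + 5 else x
  let x := if i == "6C" || i == "6D" || i == "6H" || i == "6S" then x + 6 else x
  let x := if i == "7C" || i == "7D" || i == "7H" || i == "7S" then x + 7 else x
  let x := if i == "8C" || i == "8D" || i == "8H" || i == "8S" then x + 8 else x
  let x := if i == "9C" || i == "9D" || i == "9H" || i == "9S" then x + 9 else x
  let x := if i == "10C" || i == "10D" || i == "10H" || i == "10S" then x + 10 else x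
  let x := if i == "AC" || i == "AD" || i == "AH" || i == "AS" then x + 11 else x
  x

def sum_cards (sum : List String) : Int :=
  sum.foldl pvStepA 0

-- ===== PORT B =====
-- Source B's _TABLE: the 13 ranks with their point values, in Source B's order.
def pvRanks : List (String × Int) :=
  [("2", 2), ("3", 3), ("4", 4), ("5", 5), ("6", 6), ("7", 7), ("8", 8),
   ("9", 9), ("10", 10), ("J", 2), ("Q", 3), ("K", 4), ("A", 11)]

-- Source B's nested loop: for (rank, value) in _TABLE: for suit in 'CDHS': total += value * sum.count(rank + suit)
def sum_cards_alt (sum : List String) : Int :=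
  pvRanks.foldl
    (fun total rv =>
      ("CDHS".toList).foldl
        (fun total s => total + rv.2 * (PySem.List.count sum (rv.1.push s) : Int)) total)
    0

-- ===== PRECONDITION & SPEC =====
def Spec_sum_cards (sum : List String) (out : Int) : Prop := out = sum_cards_alt sum
instance (sum : List String) (out : Int) : Decidable (Spec_sum_cards sum out) := by unfold Spec_sum_cards; infer_instance

-- ===== CLAIM (what is proved, stated in full; the proofs are below) =====
def Claim_equal_sum_cards : Prop := ∀ (sum : List String), Dom_sum_cards sum → Spec_sum_cards sum (sum_cards sum)

-- ===== LEMMAS AND PROOFS =====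

-- The flat 52-card table B's nested loop effectively iterates over, with B's per-single-card contribution.
def pvFlat : List (String × Int) :=
  [("2C", 2), ("2D", 2), ("2H", 2), ("2S", 2), ("3C", 3), ("3D", 3), ("3H", 3), ("3S", 3),
   ("4C", 4), ("4D", 4), ("4H", 4), ("4S", 4), ("5C", 5), ("5D", 5), ("5H", 5), ("5S", 5),
   ("6C", 6), ("6D", 6), ("6H", 6), ("6S", 6), ("7C", 7), ("7D", 7), ("7H", 7), ("7S", 7),
   ("8C", 8), ("8D", 8), ("8H", 8), ("8S", 8), ("9C", 9), ("9D", 9), ("9H", 9), ("9S", 9),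
   ("10C", 10), ("10D", 10), ("10H", 10), ("10S", 10), ("JC", 2), ("JD", 2), ("JH", 2), ("JS", 2),
   ("QC", 3), ("QD", 3), ("QH", 3), ("QS", 3), ("KC", 4), ("KD", 4), ("KH", 4), ("KS", 4),
   ("AC", 11), ("AD", 11), ("AH", 11), ("AS", 11)]

-- B's value of a single card i: its table contribution (1 for the matching card, 0 elsewhere).
def pvVal (i : String) : Int :=
  pvFlat.foldl (fun t p => t + p.2 * (if p.1 = i then 1 else 0)) 0

theorem pv_flatten (sum : List String) :
    sum_cards_alt sum = pvFlat.foldl (fun t p => t + p.2 * (PySem.List.count sum p.1 : Int)) 0 := by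
  rfl

theorem pv_fold_split (T : List (String × Int)) (f g : String × Int → Int) (a b : Int) :
    T.foldl (fun t p => t + (f p + g p)) (a + b)
      = T.foldl (fun t p => t + f p) a + T.foldl (fun t p => t + g p) b := by
  induction T generalizing a b with
  | nil => rfl
  | cons p T ih =>
      simp only [List.foldl_cons]
      rw [show a + b + (f p + g p) = (a + f p) + (b + g p) by ring]
      exact ih _ _

theorem pv_alt_nil : sum_cards_alt [] = 0 := by decide

theorem pv_alt_cons (i : String) (l : List String) :
    sum_cards_alt (i :: l) = pvVal i + sum_cards_alt l := by
  rw [pv_flatten, pv_flatten]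
  have hfun : (fun (t : Int) (p : String × Int) => t + p.2 * (PySem.List.count (i :: l) p.1 : Int))
      = fun t p => t + (p.2 * (if p.1 = i then 1 else 0) + p.2 * (PySem.List.count l p.1 : Int)) := by
    funext t p
    simp only [PySem.List.count_eq, List.count_cons]
    push_cast
    by_cases h : p.1 = i
    · simp [h]; ring
    · have hb : (i == p.1) = false := beq_eq_false_iff_ne.mpr fun e => h e.symm
      simp [hb, h]
  rw [hfun, show (0 : Int) = 0 + 0 from rfl, pv_fold_split]
  rfl

-- Pointwise: A's if-chain step adds exactly B's table value of the element.
theorem pvStepA_eq (x : Int) (i : String) : pvStepA x i = x + pvVal i := by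
  by_cases h2C : ("2C" : String) = i
  · subst h2C; simp [pvStepA, show pvVal "2C" = 2 from by decide]
  by_cases h2D : ("2D" : String) = i
  · subst h2D; simp [pvStepA, show pvVal "2D" = 2 from by decide]
  by_cases h2H : ("2H" : String) = i
  · subst h2H; simp [pvStepA, show pvVal "2H" = 2 from by decide]
  by_cases h2S : ("2S" : String) = i
  · subst h2S; simp [pvStepA, show pvVal "2S" = 2 from by decide]
  by_cases h3C : ("3C" : String) = i
  · subst h3C; simp [pvStepA, show pvVal "3C" = 3 from by decide]
  by_cases h3D : ("3D" : String) = i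
  · subst h3D; simp [pvStepA, show pvVal "3D" = 3 from by decide]
  by_cases h3H : ("3H" : String) = i
  · subst h3H; simp [pvStepA, show pvVal "3H" = 3 from by decide]
  by_cases h3S : ("3S" : String) = i
  · subst h3S; simp [pvStepA, show pvVal "3S" = 3 from by decide]
  by_cases h4C : ("4C" : String) = i
  · subst h4C; simp [pvStepA, show pvVal "4C" = 4 from by decide]
  by_cases h4D : ("4D" : String) = i
  · subst h4D; simp [pvStepA, show pvVal "4D" = 4 from by decide]
  by_cases h4H : ("4H" : String) = i
  · subst h4H; simp [pvStepA, show pvVal "4H" = 4 from by decide]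
  by_cases h4S : ("4S" : String) = i
  · subst h4S; simp [pvStepA, show pvVal "4S" = 4 from by decide]
  by_cases h5C : ("5C" : String) = i
  · subst h5C; simp [pvStepA, show pvVal "5C" = 5 from by decide]
  by_cases h5D : ("5D" : String) = i
  · subst h5D; simp [pvStepA, show pvVal "5D" = 5 from by decide]
  by_cases h5H : ("5H" : String) = i
  · subst h5H; simp [pvStepA, show pvVal "5H" = 5 from by decide]
  by_cases h5S : ("5S" : String) = i
  · subst h5S; simp [pvStepA, show pvVal "5S" = 5 from by decide]
  by_cases h6C : ("6C" : String) = i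
  · subst h6C; simp [pvStepA, show pvVal "6C" = 6 from by decide]
  by_cases h6D : ("6D" : String) = i
  · subst h6D; simp [pvStepA, show pvVal "6D" = 6 from by decide]
  by_cases h6H : ("6H" : String) = i
  · subst h6H; simp [pvStepA, show pvVal "6H" = 6 from by decide]
  by_cases h6S : ("6S" : String) = i
  · subst h6S; simp [pvStepA, show pvVal "6S" = 6 from by decide]
  by_cases h7C : ("7C" : String) = i
  · subst h7C; simp [pvStepA, show pvVal "7C" = 7 from by decide]
  by_cases h7D : ("7D" : String) = i
  · subst h7D; simp [pvStepA, show pvVal "7D" = 7 from by decide]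
  by_cases h7H : ("7H" : String) = i
  · subst h7H; simp [pvStepA, show pvVal "7H" = 7 from by decide]
  by_cases h7S : ("7S" : String) = i
  · subst h7S; simp [pvStepA, show pvVal "7S" = 7 from by decide]
  by_cases h8C : ("8C" : String) = i
  · subst h8C; simp [pvStepA, show pvVal "8C" = 8 from by decide]
  by_cases h8D : ("8D" : String) = i
  · subst h8D; simp [pvStepA, show pvVal "8D" = 8 from by decide]
  by_cases h8H : ("8H" : String) = i
  · subst h8H; simp [pvStepA, show pvVal "8H" = 8 from by decide]
  by_cases h8S : ("8S" : String) = i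
  · subst h8S; simp [pvStepA, show pvVal "8S" = 8 from by decide]
  by_cases h9C : ("9C" : String) = i
  · subst h9C; simp [pvStepA, show pvVal "9C" = 9 from by decide]
  by_cases h9D : ("9D" : String) = i
  · subst h9D; simp [pvStepA, show pvVal "9D" = 9 from by decide]
  by_cases h9H : ("9H" : String) = i
  · subst h9H; simp [pvStepA, show pvVal "9H" = 9 from by decide]
  by_cases h9S : ("9S" : String) = i
  · subst h9S; simp [pvStepA, show pvVal "9S" = 9 from by decide]
  by_cases h10C : ("10C" : String) = i
  · subst h10C; simp [pvStepA, show pvVal "10C" = 10 from by decide]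
  by_cases h10D : ("10D" : String) = i
  · subst h10D; simp [pvStepA, show pvVal "10D" = 10 from by decide]
  by_cases h10H : ("10H" : String) = i
  · subst h10H; simp [pvStepA, show pvVal "10H" = 10 from by decide]
  by_cases h10S : ("10S" : String) = i
  · subst h10S; simp [pvStepA, show pvVal "10S" = 10 from by decide]
  by_cases hJC : ("JC" : String) = i
  · subst hJC; simp [pvStepA, show pvVal "JC" = 2 from by decide]
  by_cases hJD : ("JD" : String) = i
  · subst hJD; simp [pvStepA, show pvVal "JD" = 2 from by decide]
  by_cases hJH : ("JH" : String) = i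
  · subst hJH; simp [pvStepA, show pvVal "JH" = 2 from by decide]
  by_cases hJS : ("JS" : String) = i
  · subst hJS; simp [pvStepA, show pvVal "JS" = 2 from by decide]
  by_cases hQC : ("QC" : String) = i
  · subst hQC; simp [pvStepA, show pvVal "QC" = 3 from by decide]
  by_cases hQD : ("QD" : String) = i
  · subst hQD; simp [pvStepA, show pvVal "QD" = 3 from by decide]
  by_cases hQH : ("QH" : String) = i
  · subst hQH; simp [pvStepA, show pvVal "QH" = 3 from by decide]
  by_cases hQS : ("QS" : String) = i
  · subst hQS; simp [pvStepA, show pvVal "QS" = 3 from by decide]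
  by_cases hKC : ("KC" : String) = i
  · subst hKC; simp [pvStepA, show pvVal "KC" = 4 from by decide]
  by_cases hKD : ("KD" : String) = i
  · subst hKD; simp [pvStepA, show pvVal "KD" = 4 from by decide]
  by_cases hKH : ("KH" : String) = i
  · subst hKH; simp [pvStepA, show pvVal "KH" = 4 from by decide]
  by_cases hKS : ("KS" : String) = i
  · subst hKS; simp [pvStepA, show pvVal "KS" = 4 from by decide]
  by_cases hAC : ("AC" : String) = i
  · subst hAC; simp [pvStepA, show pvVal "AC" = 11 from by decide]
  by_cases hAD : ("AD" : String) = i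
  · subst hAD; simp [pvStepA, show pvVal "AD" = 11 from by decide]
  by_cases hAH : ("AH" : String) = i
  · subst hAH; simp [pvStepA, show pvVal "AH" = 11 from by decide]
  by_cases hAS : ("AS" : String) = i
  · subst hAS; simp [pvStepA, show pvVal "AS" = 11 from by decide]
  simp [pvStepA, pvVal, pvFlat, List.foldl,
    h2C, Ne.symm h2C, h2D, Ne.symm h2D, h2H, Ne.symm h2H, h2S, Ne.symm h2S,
    h3C, Ne.symm h3C, h3D, Ne.symm h3D, h3H, Ne.symm h3H, h3S, Ne.symm h3S,
    h4C, Ne.symm h4C, h4D, Ne.symm h4D, h4H, Ne.symm h4H, h4S, Ne.symm h4S,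
    h5C, Ne.symm h5C, h5D, Ne.symm h5D, h5H, Ne.symm h5H, h5S, Ne.symm h5S,
    h6C, Ne.symm h6C, h6D, Ne.symm h6D, h6H, Ne.symm h6H, h6S, Ne.symm h6S,
    h7C, Ne.symm h7C, h7D, Ne.symm h7D, h7H, Ne.symm h7H, h7S, Ne.symm h7S,
    h8C, Ne.symm h8C, h8D, Ne.symm h8D, h8H, Ne.symm h8H, h8S, Ne.symm h8S,
    h9C, Ne.symm h9C, h9D, Ne.symm h9D, h9H, Ne.symm h9H, h9S, Ne.symm h9S,
    h10C, Ne.symm h10C, h10D, Ne.symm h10D, h10H, Ne.symm h10H, h10S, Ne.symm h10S,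
    hJC, Ne.symm hJC, hJD, Ne.symm hJD, hJH, Ne.symm hJH, hJS, Ne.symm hJS,
    hQC, Ne.symm hQC, hQD, Ne.symm hQD, hQH, Ne.symm hQH, hQS, Ne.symm hQS,
    hKC, Ne.symm hKC, hKD, Ne.symm hKD, hKH, Ne.symm hKH, hKS, Ne.symm hKS,
    hAC, Ne.symm hAC, hAD, Ne.symm hAD, hAH, Ne.symm hAH, hAS, Ne.symm hAS]

theorem pv_main (l : List String) (x : Int) :
    l.foldl pvStepA x = x + sum_cards_alt l := by
  induction l generalizing x with
  | nil => simp [pv_alt_nil]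
  | cons i l ih =>
      rw [List.foldl_cons, ih, pvStepA_eq, pv_alt_cons]
      ring

-- ===== VERDICT (by name: the statement is the Claim_ definition above) =====
theorem sum_cards_spec : Claim_equal_sum_cards := by
  intro sum _
  unfold Spec_sum_cards sum_cards
  rw [pv_main]
  ring
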